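-- pv_equiv track=rewrite | github.com/krotalias/cwdc | downloads/python/labs/_08c_rightTriangle.py | getAllTriangles
-- ===== SOURCE A (Python) =====
-- def rightTriangle(n, orientation=0):
--     st = ""
--     if orientation == 0:
--         for i in range(n):
--             st += "+" * (i + 1) + "=" * (n - i - 1) + " \n"
--     elif orientation == 1:
--         for i in range(n - 1, -1, -1):
--             st += "+" * (i + 1) + "=" * (n - i - 1) + " \n"
--     elif orientation == 2:
--         for i in range(n - 1, -1, -1):
--             st += "=" * (i) + "+" * (n - i) + " \n"
--     elif orientation == 3:
--         for i in range(n):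
--             st += "=" * (i) + "+" * (n - i) + " \n"
--     return st
--
-- def getAllTriangles(n):
--     symList = []
--     for i in range(4):
--         symList.append(rightTriangle(n, i).split("\n"))
--
--     # list(zip(symList[0], symList[1], symList[2], symList[3]))
--     lstr = list(zip(*symList))
--     # this is a list of tuples
--     # [('+== ', '+++ ', '==+ ', '+++ '), ('++= ', '++= ', '=++ ', '=++ '), ('+++ ', '+== ', '+++ ', '==+ ')]
--
--     st = ""
--     for i in lstr:
--         # print each tuple
--         # print ("".join(i))
--         st += "".join(i) + "\n"
--
--     return st.rstrip("\n")
-- ===== SOURCE B (Python) =====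
-- def getAllTriangles(n):
--     return "\n".join(
--         "+" * (k + 1) + "=" * (n - k - 1) + " "
--         + "+" * (n - k) + "=" * k + " "
--         + "=" * (n - 1 - k) + "+" * (k + 1) + " "
--         + "=" * k + "+" * (n - k) + " "
--         for k in range(n)
--     )
-- ===== Notes on version B (the rewrite author's own statement) =====
-- stated objective: simpler
-- what changed: B emits the composite picture one row at a time from closed-form segment counts, instead of building four full triangle strings, splitting each on newlines and transposing with zip(*).
import Mathlib
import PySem

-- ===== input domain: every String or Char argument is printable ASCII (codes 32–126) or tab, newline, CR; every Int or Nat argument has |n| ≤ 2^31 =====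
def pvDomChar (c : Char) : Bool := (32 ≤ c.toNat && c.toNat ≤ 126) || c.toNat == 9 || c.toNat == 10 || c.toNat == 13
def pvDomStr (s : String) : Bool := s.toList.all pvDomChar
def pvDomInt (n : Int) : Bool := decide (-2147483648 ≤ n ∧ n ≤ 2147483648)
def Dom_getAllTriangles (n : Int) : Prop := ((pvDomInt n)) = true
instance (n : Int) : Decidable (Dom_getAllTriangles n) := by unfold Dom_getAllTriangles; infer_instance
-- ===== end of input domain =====

-- B emits the composite picture one row at a time from closed-form '+'/'=' segment counts,
-- instead of building four full triangles, splitting them on newlines and transposing with zip(*).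

-- ===== PORT A =====
-- helper 'rightTriangle(n, orientation)': loops appending one line per i;
-- "+" * k is ported as List.replicate k.toNat '+' (Python's non-positive repeat gives "").
def rightTriangleA (n : Int) (orientation : Int) : List Char :=
  if orientation == 0 then
    (PySem.List.pyRange 0 n 1).foldl
      (fun st i => st ++ List.replicate (i + 1).toNat '+' ++ List.replicate (n - i - 1).toNat '=' ++ [' ', '\n']) []
  else if orientation == 1 then
    (PySem.List.pyRange (n - 1) (-1) (-1)).foldl
      (fun st i => st ++ List.replicate (i + 1).toNat '+' ++ List.replicate (n - i - 1).toNat '=' ++ [' ', '\n']) []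
  else if orientation == 2 then
    (PySem.List.pyRange (n - 1) (-1) (-1)).foldl
      (fun st i => st ++ List.replicate i.toNat '=' ++ List.replicate (n - i).toNat '+' ++ [' ', '\n']) []
  else if orientation == 3 then
    (PySem.List.pyRange 0 n 1).foldl
      (fun st i => st ++ List.replicate i.toNat '=' ++ List.replicate (n - i).toNat '+' ++ [' ', '\n']) []
  else []

-- zip(a, b, c, d): truncating 4-way zip (symList always has exactly four members here)
def zip4A {α : Type} : List α → List α → List α → List α → List (α × α × α × α)
  | a :: as, b :: bs, c :: cs, d :: ds => (a, b, c, d) :: zip4A as bs cs ds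
  | _, _, _, _ => []

-- s.rstrip("\n"): drop trailing newlines (exact hand port of rstrip with chars = "\n")
def rstripNlA (cs : List Char) : List Char :=
  (cs.reverse.dropWhile (· == '\n')).reverse

def getAllTriangles (n : Int) : String :=
  -- for i in range(4): symList.append(rightTriangle(n, i).split("\n"))
  let symList : List (List (List Char)) :=
    (PySem.List.pyRange 0 4 1).foldl
      (fun acc i => acc ++ [PySem.Chars.splitOn (rightTriangleA n i) ['\n']]) []
  -- lstr = list(zip(*symList)); symList has exactly four members
  let lstr : List (List Char × List Char × List Char × List Char) :=
    match symList with
    | [a, b, c, d] => zip4A a b c d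
    | _ => []
  -- for i in lstr: st += "".join(i) + "\n"
  let st : List Char :=
    lstr.foldl (fun st t => st ++ (t.1 ++ t.2.1 ++ t.2.2.1 ++ t.2.2.2) ++ ['\n']) []
  String.ofList (rstripNlA st)

-- ===== PORT B =====
def getAllTriangles_alt (n : Int) : String :=
  String.ofList (PySem.Chars.join ['\n']
    ((PySem.List.pyRange 0 n 1).map (fun k =>
      List.replicate (k + 1).toNat '+' ++ List.replicate (n - k - 1).toNat '=' ++ [' ']
      ++ List.replicate (n - k).toNat '+' ++ List.replicate k.toNat '=' ++ [' ']
      ++ List.replicate (n - 1 - k).toNat '=' ++ List.replicate (k + 1).toNat '+' ++ [' ']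
      ++ List.replicate k.toNat '=' ++ List.replicate (n - k).toNat '+' ++ [' '])))

-- ===== PRECONDITION & SPEC =====
def Spec_getAllTriangles (n : Int) (out : String) : Prop := out = getAllTriangles_alt n
instance (n : Int) (out : String) : Decidable (Spec_getAllTriangles n out) := by unfold Spec_getAllTriangles; infer_instance

-- ===== CLAIM (what is proved, stated in full; the proofs are below) =====
def Claim_equal_getAllTriangles : Prop := ∀ (n : Int), Dom_getAllTriangles n → Spec_getAllTriangles n (getAllTriangles n)

-- ===== LEMMAS AND PROOFS =====

-- the line bodies (without the trailing newline) of orientations 0/1 resp. 2/3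
def bodyP (n i : Int) : List Char :=
  List.replicate (i + 1).toNat '+' ++ List.replicate (n - i - 1).toNat '=' ++ [' ']
def bodyE (n i : Int) : List Char :=
  List.replicate i.toNat '=' ++ List.replicate (n - i).toNat '+' ++ [' ']

lemma newline_not_mem_bodyP (n i : Int) : '\n' ∉ bodyP n i := by
  simp [bodyP, List.mem_replicate]
lemma newline_not_mem_bodyE (n i : Int) : '\n' ∉ bodyE n i := by
  simp [bodyE, List.mem_replicate]

-- rightTriangleA as a flatMap of newline-terminated line bodies
lemma rtA_zero (n : Int) :
    rightTriangleA n 0 = (PySem.List.pyRange 0 n 1).flatMap (fun i => bodyP n i ++ ['\n']) := by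
  unfold rightTriangleA
  simp only [show ((0:Int) == 0) = true from rfl, if_true]
  have h : (fun (st : List Char) (i : Int) => st ++ List.replicate (i + 1).toNat '+' ++ List.replicate (n - i - 1).toNat '=' ++ [' ', '\n'])
      = fun st i => st ++ (bodyP n i ++ ['\n']) := by
    funext st i; simp [bodyP]
  rw [h, PySem.List.foldl_append_eq_flatMap]; simp

lemma rtA_one (n : Int) :
    rightTriangleA n 1 = (PySem.List.pyRange (n - 1) (-1) (-1)).flatMap (fun i => bodyP n i ++ ['\n']) := by
  unfold rightTriangleA
  simp only [show ((1:Int) == 0) = false from rfl, show ((1:Int) == 1) = true from rfl,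
    Bool.false_eq_true, if_false, if_true]
  have h : (fun (st : List Char) (i : Int) => st ++ List.replicate (i + 1).toNat '+' ++ List.replicate (n - i - 1).toNat '=' ++ [' ', '\n'])
      = fun st i => st ++ (bodyP n i ++ ['\n']) := by
    funext st i; simp [bodyP]
  rw [h, PySem.List.foldl_append_eq_flatMap]; simp

lemma rtA_two (n : Int) :
    rightTriangleA n 2 = (PySem.List.pyRange (n - 1) (-1) (-1)).flatMap (fun i => bodyE n i ++ ['\n']) := by
  unfold rightTriangleA
  simp only [show ((2:Int) == 0) = false from rfl, show ((2:Int) == 1) = false from rfl,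
    show ((2:Int) == 2) = true from rfl, Bool.false_eq_true, if_false, if_true]
  have h : (fun (st : List Char) (i : Int) => st ++ List.replicate i.toNat '=' ++ List.replicate (n - i).toNat '+' ++ [' ', '\n'])
      = fun st i => st ++ (bodyE n i ++ ['\n']) := by
    funext st i; simp [bodyE]
  rw [h, PySem.List.foldl_append_eq_flatMap]; simp

lemma rtA_three (n : Int) :
    rightTriangleA n 3 = (PySem.List.pyRange 0 n 1).flatMap (fun i => bodyE n i ++ ['\n']) := by
  unfold rightTriangleA
  simp only [show ((3:Int) == 0) = false from rfl, show ((3:Int) == 1) = false from rfl,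
    show ((3:Int) == 2) = false from rfl, show ((3:Int) == 3) = true from rfl,
    Bool.false_eq_true, if_false, if_true]
  have h : (fun (st : List Char) (i : Int) => st ++ List.replicate i.toNat '=' ++ List.replicate (n - i).toNat '+' ++ [' ', '\n'])
      = fun st i => st ++ (bodyE n i ++ ['\n']) := by
    funext st i; simp [bodyE]
  rw [h, PySem.List.foldl_append_eq_flatMap]; simp

-- a countdown range is the flipped count-up range, under any map
lemma map_pyRange_down (n : Int) (f : Int → List Char) :
    (PySem.List.pyRange (n - 1) (-1) (-1)).map f
      = (PySem.List.pyRange 0 n 1).map (fun i => f (n - 1 - i)) := by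
  rw [PySem.List.pyRange_neg_one, PySem.List.pyRange_one]
  simp [List.map_map]

lemma flatMap_eq_map (l : List Int) (f : Int → List Char) :
    l.flatMap (fun i => f i ++ ['\n']) = (l.map f).flatMap (fun b => b ++ ['\n']) := by
  simp [List.flatMap_map]

-- splitOn.go over a newline-free chunk consumes it into cur
lemma splitOn_go_skip (body : List Char) (h : '\n' ∉ body) :
    ∀ (f : Nat) (rest cur : List Char) (acc : List (List Char)),
    PySem.Chars.splitOn.go ['\n'] (body.length + f) (body ++ rest) cur acc
      = PySem.Chars.splitOn.go ['\n'] f rest (body.reverse ++ cur) acc := by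
  induction body with
  | nil => intro f rest cur acc; simp
  | cons c b ih =>
    intro f rest cur acc
    have hc : c ≠ '\n' := fun hcc => h (hcc ▸ List.mem_cons_self ..)
    have hb : '\n' ∉ b := fun hm => h (List.mem_cons_of_mem _ hm)
    have hl : (c :: b).length + f = (b.length + f) + 1 := by simp; omega
    rw [hl, PySem.Chars.splitOn.go.eq_def]
    simp only [List.cons_append]
    have hpre : (['\n'].isPrefixOf (c :: (b ++ rest))) = false := by
      simp [List.isPrefixOf]; exact fun hcc => hc hcc.symm
    rw [hpre]
    simp only [Bool.false_eq_true, if_false]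
    rw [ih hb f rest (c :: cur) acc]
    simp

-- splitOn.go consumes one separator
lemma splitOn_go_nl (f : Nat) (rest cur : List Char) (acc : List (List Char)) :
    PySem.Chars.splitOn.go ['\n'] (f + 1) ('\n' :: rest) cur acc
      = PySem.Chars.splitOn.go ['\n'] f rest [] (cur.reverse :: acc) := by
  rw [PySem.Chars.splitOn.go.eq_def]
  simp [List.isPrefixOf]

lemma splitOn_go_end (f : Nat) (cur : List Char) (acc : List (List Char)) :
    PySem.Chars.splitOn.go ['\n'] (f + 1) [] cur acc = (cur.reverse :: acc).reverse := by
  rw [PySem.Chars.splitOn.go.eq_def]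

lemma splitOn_go_flat (rows : List (List Char)) (h : ∀ r ∈ rows, '\n' ∉ r) :
    ∀ (f : Nat) (acc : List (List Char)),
    PySem.Chars.splitOn.go ['\n'] ((rows.flatMap (fun b => b ++ ['\n'])).length + (f + 1))
        (rows.flatMap (fun b => b ++ ['\n'])) [] acc
      = acc.reverse ++ rows ++ [[]] := by
  induction rows with
  | nil => intro f acc; simpa using splitOn_go_end f [] acc
  | cons r rows' ih =>
    intro f acc
    have hr : '\n' ∉ r := h r (List.mem_cons_self ..)
    have h' : ∀ x ∈ rows', '\n' ∉ x := fun x hx => h x (List.mem_cons_of_mem _ hx)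
    have hflat : (r :: rows').flatMap (fun b => b ++ ['\n']) = r ++ ('\n' :: rows'.flatMap (fun b => b ++ ['\n'])) := by
      simp
    rw [hflat]
    set F := rows'.flatMap (fun b => b ++ ['\n']) with hF
    have hlen : (r ++ '\n' :: F).length + (f + 1) = r.length + (F.length + f + 2) := by
      simp; omega
    rw [hlen, splitOn_go_skip r hr]
    have h2 : F.length + f + 2 = (F.length + (f + 1)) + 1 := by omega
    rw [h2, splitOn_go_nl]
    simp only [List.append_nil, List.reverse_reverse]
    simpa using ih h' f (r :: acc)

-- s.split("\n") of a newline-terminated concatenation of newline-free rows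
lemma splitOn_flat (rows : List (List Char)) (h : ∀ r ∈ rows, '\n' ∉ r) :
    PySem.Chars.splitOn (rows.flatMap (fun b => b ++ ['\n'])) ['\n'] = rows ++ [[]] := by
  rw [PySem.Chars.splitOn]
  simpa using splitOn_go_flat rows h 0 []

-- zip4A of four equally-indexed maps plus one appended element each
lemma zip4A_map (l : List Int) (f g h p : Int → List Char) (e1 e2 e3 e4 : List Char) :
    zip4A (l.map f ++ [e1]) (l.map g ++ [e2]) (l.map h ++ [e3]) (l.map p ++ [e4])
      = l.map (fun i => (f i, g i, h i, p i)) ++ [(e1, e2, e3, e4)] := by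
  induction l with
  | nil => simp [zip4A]
  | cons x xs ih => simp [zip4A, ih]

lemma join_append_singleton (xs : List (List Char)) (r : List Char) (h : xs ≠ []) :
    PySem.Chars.join ['\n'] (xs ++ [r]) = PySem.Chars.join ['\n'] xs ++ '\n' :: r := by
  induction xs with
  | nil => simp at h
  | cons a t ih =>
    cases t with
    | nil => simp [PySem.Chars.join_cons_cons, PySem.Chars.join_singleton]
    | cons b t' =>
      rw [List.cons_append, PySem.Chars.join_cons_cons, List.cons_append,
          PySem.Chars.join_cons_cons]
      rw [show b :: (t' ++ [r]) = (b :: t') ++ [r] from rfl, ih (by simp)]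
      simp

-- trailing-newline concatenation vs '\n'-join
lemma flatMap_eq_join (rows : List (List Char)) (h : rows ≠ []) :
    rows.flatMap (fun b => b ++ ['\n']) = PySem.Chars.join ['\n'] rows ++ ['\n'] := by
  induction rows with
  | nil => simp at h
  | cons r rest ih =>
    cases rest with
    | nil => simp [PySem.Chars.join, List.intercalate]
    | cons s t =>
      rw [List.flatMap_cons, ih (by simp), PySem.Chars.join_cons_cons]
      simp [PySem.Chars.join]

-- the final rstrip("\n") recovers the '\n'-join of the rows (each row ends with a space)
lemma rstrip_flat (rows : List (List Char)) (h : ∀ r ∈ rows, ∃ w, r = w ++ [' ']) :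
    rstripNlA (rows.flatMap (fun b => b ++ ['\n']) ++ ['\n']) = PySem.Chars.join ['\n'] rows := by
  induction rows using List.reverseRecOn with
  | nil => simp [rstripNlA, PySem.Chars.join, List.intercalate]
  | append_singleton rows' r ih =>
    obtain ⟨w, hw⟩ := h r (by simp)
    have key : rstripNlA ((rows' ++ [r]).flatMap (fun b => b ++ ['\n']) ++ ['\n'])
        = rows'.flatMap (fun b => b ++ ['\n']) ++ r := by
      rw [rstripNlA]
      have hrev : ((rows' ++ [r]).flatMap (fun b => b ++ ['\n']) ++ ['\n']).reverse
          = '\n' :: '\n' :: ' ' :: (w.reverse ++ (rows'.flatMap (fun b => b ++ ['\n'])).reverse) := by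
        simp [hw]
      rw [hrev]
      rw [List.dropWhile_cons_of_pos (by decide), List.dropWhile_cons_of_pos (by decide),
          List.dropWhile_cons_of_neg (by decide)]
      simp [hw]
    rw [key]
    rcases eq_or_ne rows' [] with hnil | hne
    · subst hnil; simp [PySem.Chars.join_singleton]
    · rw [flatMap_eq_join rows' hne, join_append_singleton rows' r hne]
      simp

-- per-row equality: A's transposed row i equals B's closed-form row i
lemma row_eq (n i : Int) :
    bodyP n i ++ (bodyP n (n - 1 - i) ++ (bodyE n (n - 1 - i) ++ bodyE n i))
      = List.replicate (i + 1).toNat '+' ++ List.replicate (n - i - 1).toNat '=' ++ [' ']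
        ++ List.replicate (n - i).toNat '+' ++ List.replicate i.toNat '=' ++ [' ']
        ++ List.replicate (n - 1 - i).toNat '=' ++ List.replicate (i + 1).toNat '+' ++ [' ']
        ++ List.replicate i.toNat '=' ++ List.replicate (n - i).toNat '+' ++ [' '] := by
  simp only [bodyP, bodyE]
  rw [show n - 1 - i + 1 = n - i by ring, show n - (n - 1 - i) - 1 = i by ring,
      show n - (n - 1 - i) = i + 1 by ring]
  simp [List.append_assoc]

theorem getAllTriangles_eq (n : Int) : getAllTriangles n = getAllTriangles_alt n := by
  unfold getAllTriangles getAllTriangles_alt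
  have hrange4 : PySem.List.pyRange 0 4 1 = [0, 1, 2, 3] := by decide
  rw [hrange4]
  simp only [List.foldl_cons, List.foldl_nil, List.nil_append, List.cons_append]
  -- the four split lists
  rw [rtA_zero, rtA_one, rtA_two, rtA_three]
  rw [flatMap_eq_map, flatMap_eq_map, flatMap_eq_map, flatMap_eq_map]
  rw [map_pyRange_down n (bodyP n), map_pyRange_down n (bodyE n)]
  have hnl : ∀ (g : Int → List Char) (hg : ∀ i, '\n' ∉ g i)
      (r : List Char), r ∈ (PySem.List.pyRange 0 n 1).map g → '\n' ∉ r := by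
    intro g hg r hr
    simp only [List.mem_map] at hr
    obtain ⟨i, _, rfl⟩ := hr
    exact hg i
  rw [splitOn_flat _ (hnl _ (fun i => newline_not_mem_bodyP n i)),
      splitOn_flat _ (hnl _ (fun i => newline_not_mem_bodyP n _)),
      splitOn_flat _ (hnl _ (fun i => newline_not_mem_bodyE n _)),
      splitOn_flat _ (hnl _ (fun i => newline_not_mem_bodyE n i))]
  rw [zip4A_map]
  -- the join loop
  have hfold : (fun (st : List Char) (t : List Char × List Char × List Char × List Char) =>
      st ++ (t.1 ++ t.2.1 ++ t.2.2.1 ++ t.2.2.2) ++ ['\n'])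
      = fun st t => st ++ ((t.1 ++ t.2.1 ++ t.2.2.1 ++ t.2.2.2) ++ ['\n']) := by
    funext st t; simp
  rw [hfold, PySem.List.foldl_append_eq_flatMap]
  rw [List.nil_append, List.flatMap_append]
  simp only [List.flatMap_cons, List.flatMap_nil]
  rw [List.flatMap_map]
  have hrows : ((PySem.List.pyRange 0 n 1).flatMap (fun i =>
      (bodyP n i ++ (bodyP n (n - 1 - i) ++ (bodyE n (n - 1 - i) ++ bodyE n i))) ++ ['\n']))
      = ((PySem.List.pyRange 0 n 1).map (fun i =>
          bodyP n i ++ (bodyP n (n - 1 - i) ++ (bodyE n (n - 1 - i) ++ bodyE n i)))).flatMap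
          (fun b => b ++ ['\n']) :=
    flatMap_eq_map _ _
  simp only [List.append_assoc] at *
  rw [hrows]
  have hends : ∀ r ∈ (PySem.List.pyRange 0 n 1).map (fun i =>
      bodyP n i ++ (bodyP n (n - 1 - i) ++ (bodyE n (n - 1 - i) ++ bodyE n i))),
      ∃ w, r = w ++ [' '] := by
    intro r hr
    simp only [List.mem_map] at hr
    obtain ⟨i, _, rfl⟩ := hr
    exact ⟨bodyP n i ++ (bodyP n (n - 1 - i) ++ (bodyE n (n - 1 - i) ++
      (List.replicate i.toNat '=' ++ List.replicate (n - i).toNat '+'))), by simp [bodyE]⟩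
  simp only [List.nil_append, List.append_nil]
  rw [rstrip_flat _ hends]
  congr 2
  apply List.map_congr_left
  intro i _
  simpa [List.append_assoc] using row_eq n i

-- ===== VERDICT (by name: the statement is the Claim_ definition above) =====
theorem getAllTriangles_spec : Claim_equal_getAllTriangles := by
  intro n _
  unfold Spec_getAllTriangles
  exact getAllTriangles_eq n
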